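-- pv_equiv track=rewrite | github.com/braydio/Arbit | arbit/engine/triangle.py | discover_triangles_from_markets
-- ===== SOURCE A (Python) =====
-- from collections.abc import Mapping
-- from itertools import combinations
-- from typing import Any, Iterable, List, Tuple
--
-- def discover_triangles_from_markets(
--     ms: Mapping[str, Mapping[str, Any] | Any],
-- ) -> list[list[str]]:
--     """Return supported triangular markets from *ms*.
--
--     Parameters
--     ----------
--     ms:
--         Mapping of market symbols to metadata as returned by
--         exchange clients' ``load_markets``. Each entry should contain
--         ``base`` and ``quote`` fields. When absent, they are inferred by
--         splitting the symbol on ``/``.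
--
--     Returns
--     -------
--     list[list[str]]
--         Sorted list of unique triangles expressed as ``[A/B, A/C, C/B]``.
--     """
--
--     if not isinstance(ms, Mapping):
--         return []
--
--     markets: dict[str, tuple[str, str]] = {}
--     for sym, info in ms.items():
--         if not isinstance(sym, str):
--             continue
--         base: str | None = None
--         quote: str | None = None
--         if isinstance(info, Mapping):
--             base = info.get("base")  # type: ignore[assignment]
--             quote = info.get("quote")  # type: ignore[assignment]
--         if not base or not quote:
--             if "/" in sym:
--                 base, quote = sym.split("/", 1)
--             else:
--                 continue
--         base = str(base).upper()
--         quote = str(quote).upper()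
--         markets[f"{base}/{quote}"] = (base, quote)
--
--     base_map: dict[str, set[str]] = {}
--     for base, quote in markets.values():
--         base_map.setdefault(base, set()).add(quote)
--
--     triangles: set[tuple[str, str, str]] = set()
--     for base, quotes in base_map.items():
--         for b, c in combinations(sorted(quotes), 2):
--             sym_ab = f"{base}/{b}"
--             sym_ac = f"{base}/{c}"
--             sym_cb = f"{c}/{b}"
--             sym_bc = f"{b}/{c}"
--             if sym_cb in markets:
--                 triangles.add((sym_ab, sym_ac, sym_cb))
--             if sym_bc in markets:
--                 triangles.add((sym_ac, sym_ab, sym_bc))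
--
--     return [list(tri) for tri in sorted(triangles)]
-- ===== SOURCE B (Python) =====
-- from collections.abc import Mapping
-- from typing import Any
--
--
-- def discover_triangles_from_markets(
--     ms: Mapping[str, Mapping[str, Any] | Any],
-- ) -> list[list[str]]:
--     """Inverse-index variant: index bases by quote, then scan ordered quote
--     pairs whose cross symbol exists and intersect the base sets."""
--     if not isinstance(ms, Mapping):
--         return []
--
--     markets: dict[str, tuple[str, str]] = {}
--     for sym, info in ms.items():
--         if not isinstance(sym, str):
--             continue
--         base = quote = None
--         if isinstance(info, Mapping):
--             base = info.get("base")
--             quote = info.get("quote")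
--         if not base or not quote:
--             if "/" not in sym:
--                 continue
--             base, quote = sym.split("/", 1)
--         base = str(base).upper()
--         quote = str(quote).upper()
--         markets[f"{base}/{quote}"] = (base, quote)
--
--     quote_map: dict[str, set[str]] = {}
--     for base, quote in markets.values():
--         quote_map.setdefault(quote, set()).add(base)
--
--     triangles: set[tuple[str, str, str]] = set()
--     for u in quote_map:
--         for v in quote_map:
--             if u == v or f"{u}/{v}" not in markets:
--                 continue
--             for a in quote_map[u] & quote_map[v]:
--                 triangles.add((f"{a}/{v}", f"{a}/{u}", f"{u}/{v}"))
--
--     return [list(tri) for tri in sorted(triangles)]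
-- ===== Notes on version B (the rewrite author's own statement) =====
-- stated objective: alternative
-- what changed: The discovery phase replaces A's base_map (base->quotes) with sorted-combinations pairs and per-pair membership tests by an inverse index quote_map (quote->bases): B scans ordered pairs of quote keys whose cross symbol u/v exists in markets and intersects the two base sets to emit triangles; the normalization phase is kept.
import Mathlib
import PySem

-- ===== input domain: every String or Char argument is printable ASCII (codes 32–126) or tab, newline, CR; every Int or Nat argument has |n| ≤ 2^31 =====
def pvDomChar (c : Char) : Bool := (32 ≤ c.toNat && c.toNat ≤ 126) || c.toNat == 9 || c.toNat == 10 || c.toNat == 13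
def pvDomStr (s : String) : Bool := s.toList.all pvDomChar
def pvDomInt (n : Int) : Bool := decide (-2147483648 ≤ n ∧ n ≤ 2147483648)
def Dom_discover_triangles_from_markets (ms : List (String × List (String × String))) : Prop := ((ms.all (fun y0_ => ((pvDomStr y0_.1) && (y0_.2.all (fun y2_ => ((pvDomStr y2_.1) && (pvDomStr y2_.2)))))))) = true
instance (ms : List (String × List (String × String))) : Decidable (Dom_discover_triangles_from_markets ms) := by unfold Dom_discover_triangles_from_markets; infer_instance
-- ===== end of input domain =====

-- B replaces A's base_map + sorted-combinations scan by an inverse index quote→bases with an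
-- ordered quote-pair scan and set intersection (objective: alternative decomposition, same cost).
-- Python triangle tuples are represented as 3-element lists throughout, since both programs
-- convert each tuple to a list in the final `[list(tri) for tri in sorted(triangles)]`.

-- ===== PORT A =====
-- f"{a}/{b}"
def pvJoin (a b : String) : String := PySem.Str.join "/" [a, b]

-- shared normalization loop body (both Pythons have this phase verbatim): one entry of ms
def pvStep (markets : PySem.Dict String (String × String))
    (p : String × List (String × String)) : PySem.Dict String (String × String) :=
  let info := PySem.Dict.ofList p.2
  let b0 := (info.get? "base").getD ""      -- `not base` on Optional[str]: None or ""
  let q0 := (info.get? "quote").getD ""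
  let bq? : Option (String × String) :=
    if b0 = "" ∨ q0 = "" then
      if PySem.Str.isIn "/" p.1 then
        match PySem.Str.splitMax? p.1 "/" 1 with   -- sym.split("/", 1): exactly two pieces here
        | some (b :: q :: _) => some (b, q)
        | _ => none
      else none                                     -- continue
    else some (b0, q0)
  match bq? with
  | none => markets
  | some bq =>
      let base := PySem.Str.upper bq.1
      let quote := PySem.Str.upper bq.2
      markets.insert (pvJoin base quote) (base, quote)

-- `for sym, info in ms.items()` iterates the dict built from ms (duplicate syms collapse, last value wins)
def pvMarkets (ms : List (String × List (String × String))) : PySem.Dict String (String × String) :=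
  (PySem.Dict.ofList ms).items.foldl pvStep PySem.Dict.empty

-- itertools.combinations(l, 2), in itertools order
def pvCombos2 : List String → List (String × String)
  | [] => []
  | x :: xs => xs.map (fun y => (x, y)) ++ pvCombos2 xs

def discover_triangles_from_markets (ms : List (String × List (String × String))) : List (List String) :=
  let markets := pvMarkets ms
  let base_map : PySem.Dict String (PySem.Set String) :=
    markets.values.foldl
      (fun d bq => d.modify bq.1 PySem.Set.empty (fun s => s.add bq.2)) PySem.Dict.empty
  let triangles : PySem.Set (List String) :=
    base_map.items.foldl (fun tris p =>
      (pvCombos2 (PySem.List.sorted p.2 (fun x => x) false)).foldl (fun tris bc =>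
        let sym_ab := pvJoin p.1 bc.1
        let sym_ac := pvJoin p.1 bc.2
        let sym_cb := pvJoin bc.2 bc.1
        let sym_bc := pvJoin bc.1 bc.2
        let tris1 := if markets.contains sym_cb then tris.add [sym_ab, sym_ac, sym_cb] else tris
        if markets.contains sym_bc then tris1.add [sym_ac, sym_ab, sym_bc] else tris1) tris)
      PySem.Set.empty
  PySem.List.sorted triangles (fun t => t) false

-- ===== PORT B =====
def discover_triangles_from_markets_alt (ms : List (String × List (String × String))) : List (List String) :=
  let markets := pvMarkets ms
  let quote_map : PySem.Dict String (PySem.Set String) :=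
    markets.values.foldl
      (fun d bq => d.modify bq.2 PySem.Set.empty (fun s => s.add bq.1)) PySem.Dict.empty
  let triangles : PySem.Set (List String) :=
    quote_map.keys.foldl (fun tris u =>
      quote_map.keys.foldl (fun tris v =>
        if u = v ∨ ¬ markets.contains (pvJoin u v) then tris
        else ((quote_map.getD u PySem.Set.empty).inter (quote_map.getD v PySem.Set.empty)).foldl
          (fun tris a => tris.add [pvJoin a v, pvJoin a u, pvJoin u v]) tris) tris)
      PySem.Set.empty
  PySem.List.sorted triangles (fun t => t) false

-- ===== PRECONDITION & SPEC =====
def Spec_discover_triangles_from_markets (ms : List (String × List (String × String))) (out : List (List String)) : Prop := out = discover_triangles_from_markets_alt ms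
instance (ms : List (String × List (String × String))) (out : List (List String)) : Decidable (Spec_discover_triangles_from_markets ms out) := by unfold Spec_discover_triangles_from_markets; infer_instance

-- ===== CLAIM (what is proved, stated in full; the proofs are below) =====
def Claim_equal_discover_triangles_from_markets : Prop := ∀ (ms : List (String × List (String × String))), Dom_discover_triangles_from_markets ms → Spec_discover_triangles_from_markets ms (discover_triangles_from_markets ms)

-- ===== LEMMAS AND PROOFS =====

-- proof-side names for the intermediate structures of the two ports
def pvBaseMap (M : PySem.Dict String (String × String)) : PySem.Dict String (PySem.Set String) :=
  M.values.foldl (fun d bq => d.modify bq.1 PySem.Set.empty (fun s => s.add bq.2)) PySem.Dict.empty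

def pvQuoteMap (M : PySem.Dict String (String × String)) : PySem.Dict String (PySem.Set String) :=
  M.values.foldl (fun d bq => d.modify bq.2 PySem.Set.empty (fun s => s.add bq.1)) PySem.Dict.empty

def pvTrisA (M : PySem.Dict String (String × String)) : PySem.Set (List String) :=
  (pvBaseMap M).items.foldl (fun tris p =>
    (pvCombos2 (PySem.List.sorted p.2 (fun x => x) false)).foldl (fun tris bc =>
      let tris1 := if M.contains (pvJoin bc.2 bc.1) then tris.add [pvJoin p.1 bc.1, pvJoin p.1 bc.2, pvJoin bc.2 bc.1] else tris
      if M.contains (pvJoin bc.1 bc.2) then tris1.add [pvJoin p.1 bc.2, pvJoin p.1 bc.1, pvJoin bc.1 bc.2] else tris1) tris)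
    PySem.Set.empty

def pvTrisB (M : PySem.Dict String (String × String)) : PySem.Set (List String) :=
  (pvQuoteMap M).keys.foldl (fun tris u =>
    (pvQuoteMap M).keys.foldl (fun tris v =>
      if u = v ∨ ¬ M.contains (pvJoin u v) then tris
      else (((pvQuoteMap M).getD u PySem.Set.empty).inter ((pvQuoteMap M).getD v PySem.Set.empty)).foldl
        (fun tris a => tris.add [pvJoin a v, pvJoin a u, pvJoin u v]) tris) tris)
    PySem.Set.empty

theorem pv_A_eq (ms : List (String × List (String × String))) :
    discover_triangles_from_markets ms = PySem.List.sorted (pvTrisA (pvMarkets ms)) (fun t => t) false := rfl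

theorem pv_B_eq (ms : List (String × List (String × String))) :
    discover_triangles_from_markets_alt ms = PySem.List.sorted (pvTrisB (pvMarkets ms)) (fun t => t) false := rfl

-- the common characterization of both triangle sets
def pvP (M : PySem.Dict String (String × String)) (t : List String) : Prop :=
  ∃ a u v, (a, u) ∈ M.values ∧ (a, v) ∈ M.values ∧ u ≠ v ∧
    M.contains (pvJoin u v) = true ∧ t = [pvJoin a v, pvJoin a u, pvJoin u v]

-- membership through a fold that only (conditionally) adds elements
theorem pv_mem_foldl {β : Type} (step : PySem.Set (List String) → β → PySem.Set (List String))
    (P : β → List String → Prop)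
    (h : ∀ s x t, t ∈ step s x ↔ t ∈ s ∨ P x t) :
    ∀ (l : List β) (s : PySem.Set (List String)) (t : List String),
      t ∈ l.foldl step s ↔ t ∈ s ∨ ∃ x ∈ l, P x t := by
  intro l
  induction l with
  | nil => simp
  | cons x xs ih =>
    intro s t
    simp only [List.foldl_cons, ih, h, List.mem_cons]
    constructor
    · rintro ((hs | hp) | ⟨y, hy, hp⟩)
      · exact Or.inl hs
      · exact Or.inr ⟨x, Or.inl rfl, hp⟩
      · exact Or.inr ⟨y, Or.inr hy, hp⟩
    · rintro (hs | ⟨y, (rfl | hy), hp⟩)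
      · exact Or.inl (Or.inl hs)
      · exact Or.inl (Or.inr hp)
      · exact Or.inr ⟨y, hy, hp⟩

-- Nodup through a fold whose step preserves it
theorem pv_nodup_foldl {β : Type} (step : PySem.Set (List String) → β → PySem.Set (List String))
    (h : ∀ s x, s.Nodup → (step s x).Nodup) :
    ∀ (l : List β) (s : PySem.Set (List String)), s.Nodup → (l.foldl step s).Nodup := by
  intro l
  induction l with
  | nil => intro s hs; simpa using hs
  | cons x xs ih => intro s hs; exact ih _ (h s x hs)

-- membership in the per-key set built by the setdefault/add loop (serves base_map and quote_map)
theorem pv_mem_getD_fold (key val : String × String → String) :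
    ∀ (V : List (String × String)) (d : PySem.Dict String (PySem.Set String)) (b q : String),
      q ∈ (V.foldl (fun d bq => d.modify (key bq) PySem.Set.empty (fun s => s.add (val bq))) d).getD b PySem.Set.empty
        ↔ q ∈ d.getD b PySem.Set.empty ∨ ∃ bq ∈ V, key bq = b ∧ val bq = q := by
  intro V
  induction V with
  | nil => simp
  | cons x xs ih =>
    intro d b q
    simp only [List.foldl_cons, ih, List.mem_cons]
    by_cases hk : key x = b
    · subst hk
      rw [PySem.Dict.getD_modify_self, PySem.Set.mem_add]
      constructor
      · rintro ((hs | rfl) | ⟨y, hy, h1, h2⟩)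
        · exact Or.inl hs
        · exact Or.inr ⟨x, Or.inl rfl, rfl, rfl⟩
        · exact Or.inr ⟨y, Or.inr hy, h1, h2⟩
      · rintro (hs | ⟨y, (rfl | hy), h1, h2⟩)
        · exact Or.inl (Or.inl hs)
        · exact Or.inl (Or.inr h2.symm)
        · exact Or.inr ⟨y, hy, h1, h2⟩
    · rw [PySem.Dict.getD_modify_of_ne _ _ _ (fun h => hk h.symm)]
      constructor
      · rintro (hs | ⟨y, hy, h1, h2⟩)
        · exact Or.inl hs
        · exact Or.inr ⟨y, Or.inr hy, h1, h2⟩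
      · rintro (hs | ⟨y, (rfl | hy), h1, h2⟩)
        · exact Or.inl hs
        · exact absurd h1 hk
        · exact Or.inr ⟨y, hy, h1, h2⟩

-- every per-key set stays Nodup through the loop
theorem pv_nodup_getD_fold (key val : String × String → String) :
    ∀ (V : List (String × String)) (d : PySem.Dict String (PySem.Set String)),
      (∀ b, (d.getD b PySem.Set.empty).Nodup) →
      ∀ b, ((V.foldl (fun d bq => d.modify (key bq) PySem.Set.empty (fun s => s.add (val bq))) d).getD b PySem.Set.empty).Nodup := by
  intro V
  induction V with
  | nil => intro d hd b; simpa using hd b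
  | cons x xs ih =>
    intro d hd b
    refine ih _ (fun b' => ?_) b
    by_cases hk : key x = b'
    · subst hk
      rw [PySem.Dict.getD_modify_self]
      exact PySem.Set.nodup_add _ _ (hd _)
    · rw [PySem.Dict.getD_modify_of_ne _ _ _ (fun h => hk h.symm)]
      exact hd b'

-- keys of the setdefault/add loop, as a membership fact
theorem pv_mem_keys_fold (key val : String × String → String)
    (V : List (String × String)) (b : String) :
    b ∈ (V.foldl (fun d bq => d.modify (key bq) PySem.Set.empty (fun s => s.add (val bq))) (PySem.Dict.empty (κ := String) (ν := PySem.Set String))).keys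
      ↔ b ∈ V.map key := by
  rw [PySem.Dict.keys_foldl_modify_key V key PySem.Set.empty (fun _ bq s => s.add (val bq)),
    PySem.Set.mem_update]
  simp [PySem.Dict.empty, PySem.Dict.keys]

theorem pv_nodup_keys_fold (key val : String × String → String)
    (V : List (String × String)) :
    ((V.foldl (fun d bq => d.modify (key bq) PySem.Set.empty (fun s => s.add (val bq))) (PySem.Dict.empty (κ := String) (ν := PySem.Set String))).keys).Nodup := by
  refine PySem.Dict.nodup_keys_foldl_modify_key V key PySem.Set.empty (fun _ bq s => s.add (val bq)) _ ?_
  simp [PySem.Dict.empty, PySem.Dict.keys]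

-- getD on base_map / quote_map reads off the market values
theorem pv_mem_baseMap (M : PySem.Dict String (String × String)) (b q : String) :
    q ∈ (pvBaseMap M).getD b PySem.Set.empty ↔ (b, q) ∈ M.values := by
  unfold pvBaseMap
  rw [pv_mem_getD_fold]
  simp only [PySem.Dict.getD_empty, PySem.Set.empty]
  constructor
  · rintro (h | ⟨bq, hbq, rfl, rfl⟩)
    · simp at h
    · simpa using hbq
  · intro h; exact Or.inr ⟨(b, q), h, rfl, rfl⟩

theorem pv_mem_quoteMap (M : PySem.Dict String (String × String)) (u a : String) :
    a ∈ (pvQuoteMap M).getD u PySem.Set.empty ↔ (a, u) ∈ M.values := by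
  unfold pvQuoteMap
  rw [pv_mem_getD_fold]
  simp only [PySem.Dict.getD_empty, PySem.Set.empty]
  constructor
  · rintro (h | ⟨bq, hbq, rfl, rfl⟩)
    · simp at h
    · simpa using hbq
  · intro h; exact Or.inr ⟨(a, u), h, rfl, rfl⟩

-- (b, c) ∈ combinations(l, 2) for a strictly increasing l
theorem pv_mem_combos2 :
    ∀ (l : List String), l.Pairwise (· < ·) →
      ∀ bc : String × String, bc ∈ pvCombos2 l ↔ bc.1 ∈ l ∧ bc.2 ∈ l ∧ bc.1 < bc.2 := by
  intro l
  induction l with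
  | nil => simp [pvCombos2]
  | cons x xs ih =>
    intro hp bc
    rw [List.pairwise_cons] at hp
    simp only [pvCombos2, List.mem_append, List.mem_map, List.mem_cons, ih hp.2]
    constructor
    · rintro (⟨y, hy, rfl⟩ | ⟨h1, h2, h3⟩)
      · exact ⟨Or.inl rfl, Or.inr hy, hp.1 y hy⟩
      · exact ⟨Or.inr h1, Or.inr h2, h3⟩
    · rintro ⟨h1 | h1, h2 | h2, h3⟩
      · rw [h1, h2] at h3; exact absurd h3 (lt_irrefl x)
      · exact Or.inl ⟨bc.2, h2, by simp [← h1]⟩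
      · rw [h2] at h3; exact absurd (h3.trans (hp.1 _ h1)) (lt_irrefl _)
      · exact Or.inr ⟨h1, h2, h3⟩

-- the sorted quote list of a base is strictly increasing
theorem pv_sorted_quotes_lt (M : PySem.Dict String (String × String)) (b : String) :
    (PySem.List.sorted ((pvBaseMap M).getD b PySem.Set.empty) (fun x => x) false).Pairwise (· < ·) := by
  have hnd0 : ((pvBaseMap M).getD b PySem.Set.empty).Nodup := by
    unfold pvBaseMap
    refine pv_nodup_getD_fold _ _ _ _ (fun b' => ?_) b
    simp [PySem.Dict.getD_empty, PySem.Set.empty]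
  have hperm := PySem.List.sorted_perm ((pvBaseMap M).getD b PySem.Set.empty) (fun x => x) false
  have hnd : (PySem.List.sorted ((pvBaseMap M).getD b PySem.Set.empty) (fun x => x) false).Nodup :=
    hperm.nodup_iff.mpr hnd0
  have hle : (PySem.List.sorted ((pvBaseMap M).getD b PySem.Set.empty) (fun x => x) false).Pairwise (· ≤ ·) := by
    have := PySem.List.sorted_pairwise ((pvBaseMap M).getD b PySem.Set.empty) (fun x => x)
    convert this using 2
  exact (hle.and hnd).imp (fun h => lt_of_le_of_ne h.1 h.2)

-- keys and Nodup keys of the two per-key maps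
theorem pv_baseMap_keys (M : PySem.Dict String (String × String)) (b : String) :
    b ∈ (pvBaseMap M).keys ↔ b ∈ M.values.map Prod.fst := by
  unfold pvBaseMap; exact pv_mem_keys_fold Prod.fst Prod.snd M.values b

theorem pv_baseMap_keys_nodup (M : PySem.Dict String (String × String)) :
    (pvBaseMap M).keys.Nodup := by
  unfold pvBaseMap; exact pv_nodup_keys_fold Prod.fst Prod.snd M.values

theorem pv_quoteMap_keys (M : PySem.Dict String (String × String)) (u : String) :
    u ∈ (pvQuoteMap M).keys ↔ u ∈ M.values.map Prod.snd := by
  unfold pvQuoteMap; exact pv_mem_keys_fold Prod.snd Prod.fst M.values u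

-- A's triangle set is exactly pvP
theorem pv_trisA_char (M : PySem.Dict String (String × String)) (t : List String) :
    t ∈ pvTrisA M ↔ pvP M t := by
  have hstep : ∀ (p : String × PySem.Set String) (s : PySem.Set (List String)) (bc : String × String) (t : List String),
      t ∈ ((fun (tris : PySem.Set (List String)) (bc : String × String) =>
        let tris1 := if M.contains (pvJoin bc.2 bc.1) then tris.add [pvJoin p.1 bc.1, pvJoin p.1 bc.2, pvJoin bc.2 bc.1] else tris
        if M.contains (pvJoin bc.1 bc.2) then tris1.add [pvJoin p.1 bc.2, pvJoin p.1 bc.1, pvJoin bc.1 bc.2] else tris1) s bc) ↔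
      t ∈ s ∨ ((M.contains (pvJoin bc.2 bc.1) = true ∧ t = [pvJoin p.1 bc.1, pvJoin p.1 bc.2, pvJoin bc.2 bc.1]) ∨
               (M.contains (pvJoin bc.1 bc.2) = true ∧ t = [pvJoin p.1 bc.2, pvJoin p.1 bc.1, pvJoin bc.1 bc.2])) := by
    intro p s bc t
    dsimp only
    split_ifs <;> (simp_all [PySem.Set.mem_add]; try tauto)
  have hmain := pv_mem_foldl _
    (fun (p : String × PySem.Set String) (t : List String) =>
      ∃ bc ∈ pvCombos2 (PySem.List.sorted p.2 (fun x => x) false),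
        (M.contains (pvJoin bc.2 bc.1) = true ∧ t = [pvJoin p.1 bc.1, pvJoin p.1 bc.2, pvJoin bc.2 bc.1]) ∨
        (M.contains (pvJoin bc.1 bc.2) = true ∧ t = [pvJoin p.1 bc.2, pvJoin p.1 bc.1, pvJoin bc.1 bc.2]))
    (fun s p t => pv_mem_foldl _ _ (hstep p) _ s t) (pvBaseMap M).items PySem.Set.empty t
  have h0 : t ∈ pvTrisA M ↔ (t ∈ (PySem.Set.empty : PySem.Set (List String)) ∨
      ∃ p ∈ (pvBaseMap M).items, ∃ bc ∈ pvCombos2 (PySem.List.sorted p.2 (fun x => x) false),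
        (M.contains (pvJoin bc.2 bc.1) = true ∧ t = [pvJoin p.1 bc.1, pvJoin p.1 bc.2, pvJoin bc.2 bc.1]) ∨
        (M.contains (pvJoin bc.1 bc.2) = true ∧ t = [pvJoin p.1 bc.2, pvJoin p.1 bc.1, pvJoin bc.1 bc.2])) := hmain
  rw [h0]
  have hitems := PySem.Dict.items_eq_map_keys (pvBaseMap M) (pv_baseMap_keys_nodup M) PySem.Set.empty
  simp only [PySem.Set.empty, List.not_mem_nil, false_or]
  constructor
  · rintro ⟨p, hp, bc, hbc, hcase⟩
    rw [hitems, List.mem_map] at hp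
    obtain ⟨b, hb, rfl⟩ := hp
    have hbc' := (pv_mem_combos2 _ (pv_sorted_quotes_lt M b) bc).mp hbc
    have h1 : (b, bc.1) ∈ M.values :=
      (pv_mem_baseMap M b bc.1).mp ((PySem.List.mem_sorted _ _ _ _).mp hbc'.1)
    have h2 : (b, bc.2) ∈ M.values :=
      (pv_mem_baseMap M b bc.2).mp ((PySem.List.mem_sorted _ _ _ _).mp hbc'.2.1)
    rcases hcase with ⟨hc, ht⟩ | ⟨hc, ht⟩
    · exact ⟨b, bc.2, bc.1, h2, h1, (ne_of_lt hbc'.2.2).symm, hc, ht⟩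
    · exact ⟨b, bc.1, bc.2, h1, h2, ne_of_lt hbc'.2.2, hc, ht⟩
  · rintro ⟨a, u, v, hau, hav, hne, hc, ht⟩
    have hb : a ∈ (pvBaseMap M).keys :=
      (pv_baseMap_keys M a).mpr (List.mem_map.mpr ⟨(a, u), hau, rfl⟩)
    refine ⟨(a, (pvBaseMap M).getD a PySem.Set.empty), ?_, ?_⟩
    · rw [hitems, List.mem_map]; exact ⟨a, hb, rfl⟩
    · have hu : u ∈ PySem.List.sorted ((pvBaseMap M).getD a PySem.Set.empty) (fun x => x) false :=
        (PySem.List.mem_sorted _ _ _ _).mpr ((pv_mem_baseMap M a u).mpr hau)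
      have hv : v ∈ PySem.List.sorted ((pvBaseMap M).getD a PySem.Set.empty) (fun x => x) false :=
        (PySem.List.mem_sorted _ _ _ _).mpr ((pv_mem_baseMap M a v).mpr hav)
      rcases lt_trichotomy u v with hlt | heq | hgt
      · exact ⟨(u, v), (pv_mem_combos2 _ (pv_sorted_quotes_lt M a) (u, v)).mpr ⟨hu, hv, hlt⟩,
          Or.inr ⟨hc, ht⟩⟩
      · exact absurd heq hne
      · exact ⟨(v, u), (pv_mem_combos2 _ (pv_sorted_quotes_lt M a) (v, u)).mpr ⟨hv, hu, hgt⟩,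
          Or.inl ⟨hc, ht⟩⟩

-- B's triangle set is exactly pvP
theorem pv_trisB_char (M : PySem.Dict String (String × String)) (t : List String) :
    t ∈ pvTrisB M ↔ pvP M t := by
  have hstep : ∀ (u : String) (s : PySem.Set (List String)) (v : String) (t : List String),
      t ∈ ((fun (tris : PySem.Set (List String)) (v : String) =>
        if u = v ∨ ¬ M.contains (pvJoin u v) then tris
        else (((pvQuoteMap M).getD u PySem.Set.empty).inter ((pvQuoteMap M).getD v PySem.Set.empty)).foldl
          (fun tris a => tris.add [pvJoin a v, pvJoin a u, pvJoin u v]) tris) s v) ↔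
      t ∈ s ∨ ((u ≠ v ∧ M.contains (pvJoin u v) = true) ∧
        ∃ a ∈ ((pvQuoteMap M).getD u PySem.Set.empty).inter ((pvQuoteMap M).getD v PySem.Set.empty),
          t = [pvJoin a v, pvJoin a u, pvJoin u v]) := by
    intro u s v t
    dsimp only
    split_ifs with hcnd
    · rcases hcnd with h | h
      · simp [h]
      · simp only [Bool.not_eq_true] at h; simp [h]
    · push Not at hcnd
      rw [pv_mem_foldl _ (fun a t => t = [pvJoin a v, pvJoin a u, pvJoin u v])
        (fun s a t => by rw [PySem.Set.mem_add])]
      simp [hcnd.1, hcnd.2]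
  have hmain := pv_mem_foldl _
    (fun (u : String) (t : List String) => ∃ v ∈ (pvQuoteMap M).keys,
      (u ≠ v ∧ M.contains (pvJoin u v) = true) ∧
      ∃ a ∈ ((pvQuoteMap M).getD u PySem.Set.empty).inter ((pvQuoteMap M).getD v PySem.Set.empty),
        t = [pvJoin a v, pvJoin a u, pvJoin u v])
    (fun s u t => pv_mem_foldl _ _ (hstep u) _ s t) (pvQuoteMap M).keys PySem.Set.empty t
  have h0 : t ∈ pvTrisB M ↔ (t ∈ (PySem.Set.empty : PySem.Set (List String)) ∨
      ∃ u ∈ (pvQuoteMap M).keys, ∃ v ∈ (pvQuoteMap M).keys,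
        (u ≠ v ∧ M.contains (pvJoin u v) = true) ∧
        ∃ a ∈ ((pvQuoteMap M).getD u PySem.Set.empty).inter ((pvQuoteMap M).getD v PySem.Set.empty),
          t = [pvJoin a v, pvJoin a u, pvJoin u v]) := hmain
  rw [h0]
  simp only [PySem.Set.empty, List.not_mem_nil, false_or]
  constructor
  · rintro ⟨u, _, v, _, ⟨hne, hc⟩, a, ha, ht⟩
    rw [PySem.Set.mem_inter] at ha
    exact ⟨a, u, v, (pv_mem_quoteMap M u a).mp ha.1, (pv_mem_quoteMap M v a).mp ha.2, hne, hc, ht⟩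
  · rintro ⟨a, u, v, hau, hav, hne, hc, ht⟩
    refine ⟨u, (pv_quoteMap_keys M u).mpr (List.mem_map.mpr ⟨(a, u), hau, rfl⟩),
      v, (pv_quoteMap_keys M v).mpr (List.mem_map.mpr ⟨(a, v), hav, rfl⟩), ⟨hne, hc⟩, a, ?_, ht⟩
    rw [PySem.Set.mem_inter]
    exact ⟨(pv_mem_quoteMap M u a).mpr hau, (pv_mem_quoteMap M v a).mpr hav⟩

theorem pv_trisA_nodup (M : PySem.Dict String (String × String)) : (pvTrisA M).Nodup := by
  unfold pvTrisA
  refine pv_nodup_foldl _ (fun s p hs => ?_) _ _ (by simp [PySem.Set.empty])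
  refine pv_nodup_foldl _ (fun s bc hs => ?_) _ _ hs
  dsimp only
  split_ifs <;> first
    | exact PySem.Set.nodup_add _ _ (PySem.Set.nodup_add _ _ hs)
    | exact PySem.Set.nodup_add _ _ hs
    | exact hs

theorem pv_trisB_nodup (M : PySem.Dict String (String × String)) : (pvTrisB M).Nodup := by
  unfold pvTrisB
  refine pv_nodup_foldl _ (fun s u hs => ?_) _ _ (by simp [PySem.Set.empty])
  refine pv_nodup_foldl _ (fun s v hs => ?_) _ _ hs
  dsimp only
  split_ifs
  · exact hs
  · exact pv_nodup_foldl _ (fun s a hs => PySem.Set.nodup_add _ _ hs) _ _ hs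

theorem discover_triangles_from_markets_spec_aux (ms : List (String × List (String × String))) :
    discover_triangles_from_markets ms = discover_triangles_from_markets_alt ms := by
  rw [pv_A_eq, pv_B_eq]
  have hperm : (pvTrisA (pvMarkets ms)).Perm (pvTrisB (pvMarkets ms)) := by
    rw [List.perm_ext_iff_of_nodup (pv_trisA_nodup _) (pv_trisB_nodup _)]
    intro t
    rw [pv_trisA_char, pv_trisB_char]
  have h2 := PySem.List.sorted_eq_sorted_of_perm (pvTrisA (pvMarkets ms)) (pvTrisB (pvMarkets ms))
    (fun a => a) (fun a b h => h) hperm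
  convert h2 using 2

-- ===== VERDICT (by name: the statement is the Claim_ definition above) =====
theorem discover_triangles_from_markets_spec : Claim_equal_discover_triangles_from_markets := by
  intro ms _
  exact discover_triangles_from_markets_spec_aux ms
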